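-- pv_equiv track=rewrite | github.com/UniNilsBrehm/VenusFlyTrap | final_analysis.py | alternate_plus_minus
-- ===== SOURCE A (Python) =====
-- def alternate_plus_minus(f_size, start_with='minus'):
--     f = [0] * f_size
--     if start_with == 'minus':
--         f_even = -1
--         f_odd = 1
--     else:
--         f_even = 1
--         f_odd = -1
--
--     for kk, vv in enumerate(f):
--         if kk % 2 == 0:
--             f[kk] = int(f_even)
--         else:
--             f[kk] = int(f_odd)
--     return f
-- ===== SOURCE B (Python) =====
-- def alternate_plus_minus(f_size, start_with='minus'):
--     pair = [-1, 1] if start_with == 'minus' else [1, -1]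
--     return (pair * ((f_size + 1) // 2))[:f_size]
-- ===== Notes on version B (the rewrite author's own statement) =====
-- stated objective: alternative
-- what changed: Instead of preallocating zeros and mutating each cell via an index-parity branch, B tiles the fixed two-element block [first, second] ceil(n/2) times by list multiplication and truncates to f_size with a slice; the per-element Python-level loop disappears into two bulk C-level operations.
import Mathlib
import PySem

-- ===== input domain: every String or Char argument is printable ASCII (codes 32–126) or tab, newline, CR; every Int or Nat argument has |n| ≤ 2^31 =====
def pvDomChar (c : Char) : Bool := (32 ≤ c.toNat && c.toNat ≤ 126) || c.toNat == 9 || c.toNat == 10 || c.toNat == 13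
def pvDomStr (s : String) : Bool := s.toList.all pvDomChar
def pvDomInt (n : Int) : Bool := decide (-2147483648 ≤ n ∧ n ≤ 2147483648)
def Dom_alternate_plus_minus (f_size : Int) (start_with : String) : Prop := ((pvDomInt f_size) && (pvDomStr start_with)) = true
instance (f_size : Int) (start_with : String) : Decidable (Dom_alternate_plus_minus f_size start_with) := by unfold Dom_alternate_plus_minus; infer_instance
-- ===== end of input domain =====

-- B builds the list by tiling a fixed two-element block [first, second] and truncating
-- to f_size, instead of A's per-element parity-branch mutation loop (objective: alternative).


-- ===== PORT A =====
-- [0]*f_size is empty for f_size ≤ 0, matching Int.toNat's clamp.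
def alternate_plus_minus (f_size : Int) (start_with : String) : List Int :=
  let f : List Int := List.replicate f_size.toNat 0
  let f_even : Int := if start_with = "minus" then -1 else 1
  let f_odd : Int := if start_with = "minus" then 1 else -1
  (List.range f.length).foldl
    (fun acc kk => if kk % 2 == 0 then acc.set kk f_even else acc.set kk f_odd) f

-- ===== PORT B =====
-- pair * n is empty for n ≤ 0, matching Int.toNat's clamp; [:f_size] is PySem.List.slice.
def alternate_plus_minus_alt (f_size : Int) (start_with : String) : List Int :=
  let pair : List Int := if start_with = "minus" then [-1, 1] else [1, -1]
  PySem.List.slice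
    (List.flatten (List.replicate (PySem.Int.floordiv (f_size + 1) 2).toNat pair))
    none (some f_size)

-- ===== PRECONDITION & SPEC =====
def Spec_alternate_plus_minus (f_size : Int) (start_with : String) (out : List Int) : Prop := out = alternate_plus_minus_alt f_size start_with
instance (f_size : Int) (start_with : String) (out : List Int) : Decidable (Spec_alternate_plus_minus f_size start_with out) := by unfold Spec_alternate_plus_minus; infer_instance

-- ===== CLAIM (what is proved, stated in full; the proofs are below) =====
def Claim_equal_alternate_plus_minus : Prop := ∀ (f_size : Int) (start_with : String), Dom_alternate_plus_minus f_size start_with → Spec_alternate_plus_minus f_size start_with (alternate_plus_minus f_size start_with)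

-- ===== LEMMAS AND PROOFS =====

-- folding "set index k to g k" over range m turns the first m entries into map g
theorem set_fold (g : Nat → Int) : ∀ (m : Nat) (f : List Int), m ≤ f.length →
    (List.range m).foldl (fun a k => a.set k (g k)) f = ((List.range m).map g) ++ f.drop m := by
  intro m
  induction m with
  | zero => intro f _; simp
  | succ n ih =>
    intro f hf
    have hn : n ≤ f.length := Nat.le_of_succ_le hf
    have hlt : n < f.length := hf
    rw [List.range_succ, List.foldl_append, ih f hn]
    have hlen : ((List.range n).map g).length = n := by simp
    simp only [List.foldl_cons, List.foldl_nil, List.map_append, List.map_cons, List.map_nil]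
    rw [List.set_append_right _ _ (by omega), hlen, Nat.sub_self,
      List.drop_eq_getElem_cons hlt]
    simp
    have hd : List.drop n f = f[n] :: List.drop (n+1) f := List.drop_eq_getElem_cons hlt
    rw [hd, List.set_cons_zero]

-- tiling the two-element block [e, o] m times is the parity pattern of length 2*m
theorem tile_eq_map (e o : Int) : ∀ (m : Nat),
    List.flatten (List.replicate m [e, o])
      = (List.range (2 * m)).map (fun k => if k % 2 == 0 then e else o) := by
  intro m
  induction m with
  | zero => simp
  | succ n ih =>
    rw [List.replicate_succ', List.flatten_append, ih]
    have h2 : 2 * (n + 1) = (2 * n + 1) + 1 := by ring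
    rw [h2, List.range_succ, List.range_succ, List.map_append, List.map_append]
    simp

-- ===== VERDICT (by name: the statement is the Claim_ definition above) =====
theorem alternate_plus_minus_spec : Claim_equal_alternate_plus_minus := by
  intro f_size start_with _
  show alternate_plus_minus f_size start_with = alternate_plus_minus_alt f_size start_with
  unfold alternate_plus_minus alternate_plus_minus_alt
  set e : Int := if start_with = "minus" then -1 else 1 with he
  set o : Int := if start_with = "minus" then 1 else -1 with ho
  have hpair : (if start_with = "minus" then ([-1, 1] : List Int) else [1, -1]) = [e, o] := by
    by_cases hs : start_with = "minus" <;> simp [he, ho, hs]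
  simp only [hpair]
  have hbranch : (fun (acc : List Int) (kk : Nat) =>
      if kk % 2 == 0 then acc.set kk e else acc.set kk o)
      = fun acc kk => acc.set kk (if kk % 2 == 0 then e else o) := by
    funext acc kk; split <;> rfl
  rw [hbranch,
    set_fold (fun kk => if kk % 2 == 0 then e else o) _ _ (le_of_eq (by simp)),
    tile_eq_map]
  simp only [List.length_replicate, List.drop_replicate, Nat.sub_self,
    List.replicate_zero, List.append_nil]
  -- both sides are prefixes of the parity pattern; compare lengths
  have hfd : PySem.Int.floordiv (f_size + 1) 2 = (f_size + 1) / 2 := by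
    norm_num [PySem.Int.floordiv, Int.fdiv_eq_ediv]
  by_cases hpos : 0 ≤ f_size
  · obtain ⟨n, rfl⟩ := Int.eq_ofNat_of_zero_le hpos
    rw [PySem.List.slice_to_natCast]
    have hm : ((PySem.Int.floordiv ((n : Int) + 1) 2).toNat) = (n + 1) / 2 := by
      rw [hfd, show ((n : Int) + 1) = ((n + 1 : Nat) : Int) by push_cast; ring]
      rfl
    rw [hm, Int.toNat_natCast]
    rw [← List.map_take, List.take_range]
    congr 2
    omega
  · have hneg : f_size < 0 := by omega
    have hm0 : (PySem.Int.floordiv (f_size + 1) 2).toNat = 0 := by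
      rw [hfd]; omega
    have hn0 : f_size.toNat = 0 := by omega
    have hm0' : (f_size + 1) / 2 ≤ 0 := by omega
    simp [hn0, PySem.List.slice, hm0']
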